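-- pv_equiv track=rewrite | github.com/Lazar-Ilic/Lazar | Notes/Computer Science/Algorithms/Meta/Sebastien Rubens Meta Puzzles Solutions/py3/l3_slippery_trip.py | getMaxCollectableCoins
-- ===== SOURCE A (Python) =====
-- from typing import List
--
-- def get_counts(row, counts):
--     # complexity: O(C)
--     counts[ord('*')] = 0
--     counts[ord('>')] = 0
--     counts[ord('v')] = 0
--     for c in row:
--         ord_c = ord(c)
--         if ord_c >= 256:
--             ord_c = ord('.')
--         counts[ord_c] += 1
--     count_star = counts[ord('*')]
--     count_right = counts[ord('>')]
--     count_down = counts[ord('v')]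
--     return count_star, count_right, count_down
--
-- def get_nb_coins_right_then_down3(row, count_down, count_right):
--     # Complexity: O(C)
--     if count_down == 0:
--         return 0
--     j = row.index('v') + 1
--     new_row = row[j:] + row[:j]  # transform the string the end with 'v'
--     nb_coins_right_then_down, nb_coins, last = 0, 0, 0
--     while count_right * count_down != 0:
--         first = new_row.index('>', last)
--         last = new_row.index('v', first) + 1
--         nb_coins_right_then_down = max(nb_coins_right_then_down, new_row[first: last].count('*'))
--         count_down -= 1
--         count_right -= new_row[first: last].count('>')
--     return nb_coins_right_then_down
--
-- def getMaxCollectableCoins(R: int, C: int, G: List[List[str]]) -> int: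
--     # https://www.metacareers.com/profile/coding_puzzles/?puzzle=2881982598796847
--     # Constraints
--     #   2 ≤ R, C ≤ 400,000
--     #   R∗C ≤ 800,000
--     #   Gi,j ∈ {".", "*", ">", "v"}
--     # Complexity: O(N), where N = R*C
--
--     counts = [0] * 256
--     res = 0
--     for row in G[::-1]:  # O(R)
--         count_star, count_right, count_down = get_counts(row, counts)  # O(C)
--         nb_coins_immediately_down = min(count_star, 1)
--         if count_right == C:  # we can only go right
--             res = 0
--         elif count_right == 0:  # we cannot go right
--             res += nb_coins_immediately_down
--         else:
--             # at the stage, we have a choice between: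
--             # - going down immediately (nb_coins_immediately_down), or
--             # - going right then down (nb_coins_right_then_down), or
--             # - going right forever (nb_coins_right_forever).
--             nb_coins_right_then_down = get_nb_coins_right_then_down3(row, count_down, count_right)  # O(C)
--             nb_coins_right_forever = count_star if count_down == 0 else 0
--             res = max(nb_coins_immediately_down + res, nb_coins_right_then_down + res, nb_coins_right_forever)
--     return res
-- ===== SOURCE B (Python) =====
-- from typing import List
--
-- def _row_stats(row):
--     # one pass over the cells' character codes: counts of '*', '>', 'v'
--     # and the index of the first 'v' (ord raises on malformed cells, as in A)
--     stars = rights = downs = 0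
--     first_v = -1
--     for i, c in enumerate(row):
--         o = ord(c)
--         if o == ord('*'):
--             stars += 1
--         elif o == ord('>'):
--             rights += 1
--         elif o == ord('v'):
--             downs += 1
--             if first_v < 0:
--                 first_v = i
--     return stars, rights, downs, first_v
--
-- def _right_then_down(row, first_v):
--     # rotate so the row ends just after the first 'v', then one flag scan
--     j = first_v + 1
--     best = cur = 0
--     in_seg = False
--     for c in row[j:] + row[:j]:
--         if in_seg:
--             if c == 'v':
--                 if cur > best:
--                     best = cur
--                 cur = 0
--                 in_seg = False
--             elif c == '*':
--                 cur += 1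
--         elif c == '>':
--             in_seg = True
--     return best
--
-- def getMaxCollectableCoins(R: int, C: int, G: List[List[str]]) -> int:
--     res = 0
--     for row in reversed(G):
--         stars, rights, downs, first_v = _row_stats(row)
--         down_now = min(stars, 1)
--         if rights == C:
--             res = 0
--         elif rights == 0:
--             res += down_now
--         else:
--             rtd = _right_then_down(row, first_v) if downs else 0
--             forever = stars if downs == 0 else 0
--             res = max(down_now + res, rtd + res, forever)
--     return res
-- ===== Notes on version B (the rewrite author's own statement) =====
-- stated objective: simpler
-- what changed: B replaces A's 256-slot ord-indexed counts array and the right-then-down while-loop of repeated list.index/count/slice calls by one counting pass per row (counts plus first-'v' index) and one single-accumulator flag scan over the rotated row.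
import Mathlib
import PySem

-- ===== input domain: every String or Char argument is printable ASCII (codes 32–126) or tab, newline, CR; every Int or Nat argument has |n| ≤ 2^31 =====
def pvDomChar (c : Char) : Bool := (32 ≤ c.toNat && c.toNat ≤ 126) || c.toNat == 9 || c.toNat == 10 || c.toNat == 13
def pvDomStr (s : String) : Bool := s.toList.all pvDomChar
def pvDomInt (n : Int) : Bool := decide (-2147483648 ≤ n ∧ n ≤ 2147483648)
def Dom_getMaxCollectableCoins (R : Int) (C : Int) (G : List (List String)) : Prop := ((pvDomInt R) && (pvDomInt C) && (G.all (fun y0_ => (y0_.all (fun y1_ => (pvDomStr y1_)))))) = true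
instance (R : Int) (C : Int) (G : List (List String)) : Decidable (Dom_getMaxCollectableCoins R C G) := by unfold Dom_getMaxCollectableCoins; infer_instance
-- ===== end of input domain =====

-- B replaces A's 256-slot counts array and index/count/slice while-loop by one counting pass
-- per row plus one single-accumulator flag scan over the rotated row (objective: simpler).

-- ===== PORT A =====

-- ord(c): exact for the single-character strings Pre_ admits (Python raises TypeError otherwise)
def pyOrd (s : String) : Nat :=
  match s.toList with
  | [c] => c.toNat
  | _ => 0

-- get_counts: Python's 256-entry list `counts`, modelled as a function on indices
-- (only indices < 256 are ever written or read, so the model is exact)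
def countsStepA (cs : Nat → Int) (c : String) : Nat → Int :=
  let o := pyOrd c
  let o := if 256 ≤ o then 46 else o       -- if ord_c >= 256: ord_c = ord('.')
  fun i => if i = o then cs o + 1 else cs i  -- counts[ord_c] += 1

def getCountsA (row : List String) (counts : Nat → Int) : (Int × Int × Int) × (Nat → Int) :=
  let counts : Nat → Int := fun i => if i = 42 ∨ i = 62 ∨ i = 118 then 0 else counts i
  let counts := row.foldl countsStepA counts
  ((counts 42, counts 62, counts 118), counts)

-- list.index(v, start) for a Nat start (Python searches from `start`); none = ValueError
def pyIndexFrom (xs : List String) (v : String) (start : Nat) : Option Nat :=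
  (PySem.List.index? (xs.drop start) v).map (start + ·)

-- the `while count_right * count_down != 0` loop; count_down is a nonnegative count that the
-- loop decrements by exactly 1 per iteration and tests against 0, so Nat recursion on it is exact
def rtdLoopA (newRow : List String) : Nat → Int → Int → Nat → Int
  | 0, _, acc, _ => acc                    -- count_down = 0: product is 0, loop exits
  | cd + 1, cr, acc, last =>
    if cr = 0 then acc                     -- count_right = 0: product is 0, loop exits
    else
      match pyIndexFrom newRow ">" last with
      | none => acc                        -- Python would raise ValueError; unreachable from getMaxCollectableCoins
      | some first =>
        match pyIndexFrom newRow "v" first with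
        | none => acc                      -- likewise unreachable
        | some lastV =>
          let seg := PySem.List.slice newRow (some (first : Int)) (some ((lastV + 1 : Nat) : Int))
          rtdLoopA newRow cd (cr - (seg.count ">" : Int)) (max acc (seg.count "*" : Int)) (lastV + 1)

-- get_nb_coins_right_then_down3 (countDown passed as the Nat value of the nonnegative count)
def rtd3A (row : List String) (countDown : Nat) (countRight : Int) : Int :=
  if countDown = 0 then 0
  else
    let j := (PySem.List.index? row "v").getD 0 + 1    -- row.index('v') + 1 ('v' present since countDown ≠ 0)
    let newRow := PySem.List.slice row (some (j : Int)) none ++ PySem.List.slice row none (some (j : Int))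
    rtdLoopA newRow countDown countRight 0 0

def stepA (C : Int) (st : (Nat → Int) × Int) (row : List String) : (Nat → Int) × Int :=
  let res := st.2
  let r := getCountsA row st.1
  let countStar := r.1.1
  let countRight := r.1.2.1
  let countDown := r.1.2.2
  let nbImm := min countStar 1
  if countRight = C then (r.2, 0)
  else if countRight = 0 then (r.2, res + nbImm)
  else
    let nbRtd := rtd3A row countDown.toNat countRight
    let nbForever := if countDown = 0 then countStar else 0
    (r.2, max (max (nbImm + res) (nbRtd + res)) nbForever)

def getMaxCollectableCoins (R : Int) (C : Int) (G : List (List String)) : Int :=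
  let rev := (PySem.List.slice? G none none (-1)).getD []     -- G[::-1]
  (rev.foldl (stepA C) ((fun _ => 0), 0)).2                   -- counts = [0] * 256

-- ===== PORT B =====

-- _row_stats: one pass over ord(c), computing (stars, rights, downs, first_v), first_v = -1 if absent
def rowStatsStepB : (Int × Int × Int × Int × Int) → String → Int × Int × Int × Int × Int
  | (stars, rights, downs, firstV, i), c =>
    let o := pyOrd c                       -- o = ord(c); 42 = ord('*'), 62 = ord('>'), 118 = ord('v')
    if o = 42 then (stars + 1, rights, downs, firstV, i + 1)
    else if o = 62 then (stars, rights + 1, downs, firstV, i + 1)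
    else if o = 118 then (stars, rights, downs + 1, (if firstV < 0 then i else firstV), i + 1)
    else (stars, rights, downs, firstV, i + 1)

def rowStatsB (row : List String) : Int × Int × Int × Int :=
  let r := row.foldl rowStatsStepB (0, 0, 0, -1, 0)
  (r.1, r.2.1, r.2.2.1, r.2.2.2.1)

-- the flag scan of _right_then_down
def scanB : List String → Bool → Int → Int → Int
  | [], _, _, best => best
  | c :: rest, inseg, cur, best =>
    if inseg then
      if c = "v" then scanB rest false 0 (if cur > best then cur else best)
      else if c = "*" then scanB rest true (cur + 1) best
      else scanB rest true cur best
    else if c = ">" then scanB rest true cur best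
    else scanB rest false cur best

def rightThenDownB (row : List String) (firstV : Int) : Int :=
  let j := (firstV + 1).toNat        -- first_v ≥ 0 whenever called (downs ≠ 0)
  scanB (PySem.List.slice row (some (j : Int)) none ++ PySem.List.slice row none (some (j : Int)))
    false 0 0                        -- row[j:] + row[:j]

def stepB (C : Int) (res : Int) (row : List String) : Int :=
  let s := rowStatsB row
  let stars := s.1
  let rights := s.2.1
  let downs := s.2.2.1
  let firstV := s.2.2.2
  let downNow := min stars 1
  if rights = C then 0
  else if rights = 0 then res + downNow
  else
    let rtd := if downs ≠ 0 then rightThenDownB row firstV else 0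
    let forever := if downs = 0 then stars else 0
    max (max (downNow + res) (rtd + res)) forever

def getMaxCollectableCoins_alt (R : Int) (C : Int) (G : List (List String)) : Int :=
  G.reverse.foldl (stepB C) 0        -- for row in reversed(G)

-- ===== PRECONDITION & SPEC =====

-- Pre_ excludes grids with a cell that is not exactly one character: Python's ord raises TypeError there.
def Pre_getMaxCollectableCoins (R : Int) (C : Int) (G : List (List String)) : Prop :=
  ∀ row ∈ G, ∀ s ∈ row, s.toList.length = 1
instance (R : Int) (C : Int) (G : List (List String)) : Decidable (Pre_getMaxCollectableCoins R C G) := by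
  unfold Pre_getMaxCollectableCoins; infer_instance

def pvWitness_getMaxCollectableCoins : Int × Int × List (List String) :=
  (2, 3, [[".", "*", ">"], ["v", ".", "."]])

def Spec_getMaxCollectableCoins (R : Int) (C : Int) (G : List (List String)) (out : Int) : Prop := out = getMaxCollectableCoins_alt R C G
instance (R : Int) (C : Int) (G : List (List String)) (out : Int) : Decidable (Spec_getMaxCollectableCoins R C G out) := by unfold Spec_getMaxCollectableCoins; infer_instance

-- ===== CLAIM (what is proved, stated in full; the proofs are below) =====
def Claim_equal_getMaxCollectableCoins : Prop := ∀ (R : Int) (C : Int) (G : List (List String)), Dom_getMaxCollectableCoins R C G → Pre_getMaxCollectableCoins R C G → Spec_getMaxCollectableCoins R C G (getMaxCollectableCoins R C G)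

-- ===== LEMMAS AND PROOFS =====

-- ---- scanB facts ----

theorem scanB_nonneg (S : List String) : ∀ (inseg : Bool) (cur best : Int), 0 ≤ best →
    0 ≤ scanB S inseg cur best := by
  induction S with
  | nil => intro _ _ _ h; simpa [scanB] using h
  | cons c rest ih =>
    intro inseg cur best h
    simp only [scanB]
    split_ifs <;> first | exact ih _ _ _ h | exact ih _ _ _ (by omega)

theorem scanB_max (S : List String) : ∀ (inseg : Bool) (cur best : Int), 0 ≤ best →
    scanB S inseg cur best = max best (scanB S inseg cur 0) := by
  induction S with
  | nil => intro _ _ _ h; simp [scanB]; omega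
  | cons c rest ih =>
    intro inseg cur best h
    simp only [scanB]
    by_cases h1 : inseg = true
    · rw [if_pos h1, if_pos h1]
      by_cases h2 : c = "v"
      · rw [if_pos h2, if_pos h2]
        rw [ih false 0 (if cur > best then cur else best) (by split_ifs <;> omega),
            ih false 0 (if cur > 0 then cur else 0) (by split_ifs <;> omega)]
        have := scanB_nonneg rest false 0 0 le_rfl
        split_ifs <;> omega
      · rw [if_neg h2, if_neg h2]
        by_cases h3 : c = "*"
        · rw [if_pos h3, if_pos h3]; exact ih _ _ _ h
        · rw [if_neg h3, if_neg h3]; exact ih _ _ _ h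
    · rw [if_neg h1, if_neg h1]
      by_cases h2 : c = ">"
      · rw [if_pos h2, if_pos h2]; exact ih _ _ _ h
      · rw [if_neg h2, if_neg h2]; exact ih _ _ _ h

theorem scanB_no_v (S : List String) : ∀ (inseg : Bool) (cur best : Int), "v" ∉ S →
    scanB S inseg cur best = best := by
  induction S with
  | nil => intro _ _ _ _; simp [scanB]
  | cons c rest ih =>
    intro inseg cur best h
    have hc : c ≠ "v" := fun hc => h (by simp [hc])
    have hr : "v" ∉ rest := fun hr => h (List.mem_cons_of_mem _ hr)
    simp only [scanB]
    split_ifs <;> first | exact absurd ‹c = "v"› hc | exact ih _ _ _ hr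

theorem scanB_skip (pre : List String) (rest : List String) : ∀ (cur best : Int), ">" ∉ pre →
    scanB (pre ++ rest) false cur best = scanB rest false cur best := by
  induction pre with
  | nil => intro _ _ _; simp
  | cons c p ih =>
    intro cur best h
    have hc : c ≠ ">" := fun hc => h (by simp [hc])
    simp only [List.cons_append, scanB, if_neg (by simp : ¬(false = true)), if_neg hc]
    exact ih _ _ (fun hr => h (List.mem_cons_of_mem _ hr))

theorem scanB_no_gt (S : List String) (cur best : Int) (h : ">" ∉ S) :
    scanB S false cur best = best := by
  have := scanB_skip S [] cur best h
  simpa [scanB] using this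

theorem scanB_segment (mid : List String) : ∀ (rest : List String) (cur best : Int), "v" ∉ mid →
    scanB (mid ++ "v" :: rest) true cur best
      = scanB rest false 0 (max best (cur + (mid.count "*" : Int))) := by
  induction mid with
  | nil =>
    intro rest cur best _
    simp only [List.nil_append, scanB, List.count_nil, Nat.cast_zero, add_zero, if_pos, if_pos rfl]
    congr 1
    split_ifs <;> omega
  | cons c m ih =>
    intro rest cur best h
    have hc : c ≠ "v" := fun hc => h (by simp [hc])
    have hm : "v" ∉ m := fun hr => h (List.mem_cons_of_mem _ hr)
    simp only [List.cons_append, scanB, if_pos, if_neg hc]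
    by_cases hs : c = "*"
    · rw [if_pos hs, ih rest (cur+1) best hm]
      congr 1
      subst hs
      simp [List.count_cons]
      omega
    · rw [if_neg hs, ih rest cur best hm]
      congr 1
      rw [List.count_cons, beq_false_of_ne hs]
      simp

theorem rtdLoopA_eq (newRow : List String) : ∀ (cd : Nat) (last : Nat) (cr acc : Int),
    (newRow.drop last = [] ∨ (newRow.drop last).getLast? = some "v") →
    cr = ((newRow.drop last).count ">" : Int) →
    (newRow.drop last).count "v" ≤ cd →
    0 ≤ acc →
    rtdLoopA newRow cd cr acc last = max acc (scanB (newRow.drop last) false 0 0) := by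
  intro cd
  induction cd generalizing newRow with
  | zero =>
    intro last cr acc hend hcr hcd hacc
    have hv : "v" ∉ newRow.drop last := List.count_eq_zero.mp (Nat.le_zero.mp hcd)
    rw [scanB_no_v _ _ _ _ hv]
    simp only [rtdLoopA]
    omega
  | succ cd ih =>
    intro last cr acc hend hcr hcd hacc
    by_cases hcr0 : cr = 0
    · have hgt : ">" ∉ newRow.drop last := by
        rw [hcr0] at hcr
        exact List.count_eq_zero.mp (by exact_mod_cast hcr.symm)
      rw [scanB_no_gt _ _ _ hgt]
      simp only [rtdLoopA, if_pos hcr0]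
      omega
    · have hmem : ">" ∈ newRow.drop last := by
        by_contra hn
        exact hcr0 (by rw [hcr, List.count_eq_zero.mpr hn]; simp)
      obtain ⟨f, hf⟩ := Option.isSome_iff_exists.mp ((PySem.List.index?_isSome_iff _ _).mpr hmem)
      obtain ⟨pre, suf, hSdec, hplen, hpre⟩ := (PySem.List.index?_eq_some_iff _ _ _).mp hf
      -- the suffix after the '>' is nonempty and still ends with 'v'
      have hSne : newRow.drop last ≠ [] := by rw [hSdec]; simp
      have hlastS : (newRow.drop last).getLast? = some "v" := hend.resolve_left hSne
      have hsufne : suf ≠ [] := by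
        rintro rfl
        rw [hSdec, List.getLast?_concat] at hlastS
        simp at hlastS
      have hlastsuf : suf.getLast? = some "v" := by
        rw [hSdec, show pre ++ ">" :: suf = (pre ++ [">"]) ++ suf by simp,
            List.getLast?_append_of_ne_nil _ hsufne] at hlastS
        exact hlastS
      have hvsuf : "v" ∈ suf := by
        have := List.mem_of_getLast? hlastsuf
        exact this
      obtain ⟨g, hg⟩ := Option.isSome_iff_exists.mp ((PySem.List.index?_isSome_iff _ _).mpr hvsuf)
      obtain ⟨mid, rest, hsufdec, hmlen, hmid⟩ := (PySem.List.index?_eq_some_iff _ _ _).mp hg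
      -- the two pyIndexFrom calls
      have hdropf : newRow.drop (last + f) = ">" :: suf := by
        rw [← List.drop_drop, hSdec, ← hplen, List.drop_left]
      have hpy1 : pyIndexFrom newRow ">" last = some (last + f) := by
        unfold pyIndexFrom
        rw [hf]
        rfl
      have hpy2 : pyIndexFrom newRow "v" (last + f) = some (last + f + (g + 1)) := by
        unfold pyIndexFrom
        rw [hdropf, PySem.List.index?_cons_of_ne _ (by decide : (">" : String) ≠ "v"), hg]
        rfl
      -- the segment
      have hseg : PySem.List.slice newRow (some ((last + f : Nat) : Int))
          (some ((last + f + (g + 1) + 1 : Nat) : Int)) = ">" :: (mid ++ ["v"]) := by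
        rw [PySem.List.slice_natCast, hdropf,
            show last + f + (g + 1) + 1 - (last + f) = g + 2 by omega]
        rw [List.take_succ_cons, hsufdec, ← hmlen,
            show mid.length + 1 = mid.length + 1 by rfl]
        rw [show mid ++ "v" :: rest = mid ++ (["v"] ++ rest) by simp, ← List.append_assoc]
        rw [show mid.length + 1 = (mid ++ ["v"]).length by simp, List.take_left]
      have hsegstar : ((">" :: (mid ++ ["v"])).count "*" : Nat) = mid.count "*" := by
        rw [List.count_cons, List.count_append]
        simp
      have hseggt : ((">" :: (mid ++ ["v"])).count ">" : Nat) = mid.count ">" + 1 := by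
        rw [List.count_cons, List.count_append]
        simp
      -- the new suffix
      have hdrop' : newRow.drop (last + f + (g + 1) + 1) = rest := by
        rw [show last + f + (g + 1) + 1 = (last + f) + (g + 2) by omega, ← List.drop_drop,
            hdropf, List.drop_succ_cons, hsufdec, show g + 1 = mid.length + 1 by omega,
            List.drop_length_add_append]
        simp
      -- side conditions for the induction hypothesis
      have hX := scanB_nonneg rest false 0 0 le_rfl
      have hend' : newRow.drop (last + f + (g + 1) + 1) = [] ∨
          (newRow.drop (last + f + (g + 1) + 1)).getLast? = some "v" := by
        rw [hdrop']
        rcases eq_or_ne rest [] with h | h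
        · exact Or.inl h
        · right
          have heq : (newRow.drop last).getLast? = rest.getLast? := by
            rw [hSdec, hsufdec,
                show pre ++ ">" :: (mid ++ "v" :: rest) = (pre ++ ">" :: mid ++ ["v"]) ++ rest by
                  simp,
                List.getLast?_append_of_ne_nil _ h]
          rw [← heq]
          exact hlastS
      have hc1 : (newRow.drop last).count ">" = mid.count ">" + 1 + rest.count ">" := by
        rw [hSdec, hsufdec]
        simp [List.count_append, List.count_cons, List.count_eq_zero.mpr hpre]
        omega
      have hc2 : 1 + rest.count "v" ≤ (newRow.drop last).count "v" := by
        rw [hSdec, hsufdec]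
        simp [List.count_append, List.count_cons]
        omega
      -- the scan of the whole suffix decomposes into the first segment and the rest
      have h1 : scanB (">" :: suf) false 0 0 = scanB suf true 0 0 := by simp [scanB]
      have hscan : scanB (newRow.drop last) false 0 0
          = max ((mid.count "*" : Int)) (scanB rest false 0 0) := by
        rw [hSdec, scanB_skip pre _ _ _ hpre, h1, hsufdec, scanB_segment mid _ _ _ hmid,
            scanB_max rest false 0 _ (by omega)]
        omega
      -- one step of A's loop, then the induction hypothesis
      simp only [rtdLoopA, if_neg hcr0, hpy1, hpy2, hseg]
      rw [ih newRow (last + f + (g + 1) + 1) _ _ hend'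
            (by rw [hdrop']; push_cast [hseggt]; rw [hcr]; push_cast [hc1]; ring)
            (by rw [hdrop']; omega)
            (by positivity)]
      rw [hdrop', hscan]
      have hstar0 : (0 : Int) ≤ (mid.count "*" : Int) := by positivity
      rw [hsegstar]
      omega

theorem getCountsA_fold (row : List String) : ∀ (cnt : Nat → Int) (t : Nat), t < 256 → t ≠ 46 →
    (row.foldl countsStepA cnt) t = cnt t + (row.countP (fun s => pyOrd s == t) : Int) := by
  induction row with
  | nil => intro cnt t _ _; simp
  | cons c row ih =>
    intro cnt t ht h46
    rw [List.foldl_cons, ih _ t ht h46, List.countP_cons]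
    unfold countsStepA
    by_cases h : pyOrd c = t
    · have h2 : ¬ 256 ≤ pyOrd c := by omega
      rw [h] at h2
      simp only [h, if_neg h2, if_pos rfl, beq_self_eq_true, if_true]
      push_cast
      ring
    · have hne : (pyOrd c == t) = false := beq_false_of_ne h
      rw [hne]
      by_cases h2 : 256 ≤ pyOrd c
      · simp only [if_pos h2, if_neg (show ¬ t = 46 from h46)]
        push_cast
        ring
      · simp only [if_neg h2, if_neg (show ¬ t = pyOrd c from fun hh => h hh.symm)]
        push_cast
        ring

theorem char_eq_of_toNat {c d : Char} (h : c.toNat = d.toNat) : c = d := by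
  apply Char.ext
  apply UInt32.ext
  have h2 : c.val.toNat = d.val.toNat := h
  omega

theorem pyOrd_eq_iff (s : String) (t : Nat) (d : Char) (w : String)
    (hw : w.toList = [d]) (hd : d.toNat = t) (hs : s.toList.length = 1) :
    pyOrd s = t ↔ s = w := by
  obtain ⟨c, hc⟩ := List.length_eq_one_iff.mp hs
  have hord : pyOrd s = c.toNat := by simp [pyOrd, hc]
  constructor
  · intro hh
    apply String.toList_inj.mp
    rw [hc, hw]
    have hcd : c = d := char_eq_of_toNat (by rw [← hord, hh, hd])
    rw [hcd]
  · intro hh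
    rw [hord, ← hd]
    have hcd : c = d := by
      have h2 := congrArg String.toList hh
      rw [hc, hw] at h2
      injection h2 with h3 _
    rw [hcd]

theorem getCountsA_fst (row : List String) (cnt : Nat → Int)
    (h : ∀ s ∈ row, s.toList.length = 1) :
    (getCountsA row cnt).1 = ((row.count "*" : Int), (row.count ">" : Int), (row.count "v" : Int)) := by
  unfold getCountsA
  simp only
  rw [getCountsA_fold row _ 42 (by omega) (by omega),
      getCountsA_fold row _ 62 (by omega) (by omega),
      getCountsA_fold row _ 118 (by omega) (by omega)]
  have hstar : row.countP (fun s => pyOrd s == 42) = row.count "*" := by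
    rw [List.count_eq_countP]
    refine List.countP_congr (fun s hsmem => ?_)
    simp only [beq_iff_eq]
    exact pyOrd_eq_iff s 42 '*' "*" rfl rfl (h s hsmem)
  have hgt : row.countP (fun s => pyOrd s == 62) = row.count ">" := by
    rw [List.count_eq_countP]
    refine List.countP_congr (fun s hsmem => ?_)
    simp only [beq_iff_eq]
    exact pyOrd_eq_iff s 62 '>' ">" rfl rfl (h s hsmem)
  have hv : row.countP (fun s => pyOrd s == 118) = row.count "v" := by
    rw [List.count_eq_countP]
    refine List.countP_congr (fun s hsmem => ?_)
    simp only [beq_iff_eq]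
    exact pyOrd_eq_iff s 118 'v' "v" rfl rfl (h s hsmem)
  simp [hstar, hgt, hv]

-- proof-side string-comparison version of B's row-stats step, and its agreement with the port
-- on single-character cells (pyOrd s = 42/62/118 ↔ s = "*"/">"/"v" there)
def rowStatsStepStr : (Int × Int × Int × Int × Int) → String → Int × Int × Int × Int × Int
  | (stars, rights, downs, firstV, i), c =>
    if c = "*" then (stars + 1, rights, downs, firstV, i + 1)
    else if c = ">" then (stars, rights + 1, downs, firstV, i + 1)
    else if c = "v" then (stars, rights, downs + 1, (if firstV < 0 then i else firstV), i + 1)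
    else (stars, rights, downs, firstV, i + 1)

theorem rowStatsStep_agree (st : Int × Int × Int × Int × Int) (c : String)
    (h : c.toList.length = 1) : rowStatsStepB st c = rowStatsStepStr st c := by
  obtain ⟨stars, rights, downs, firstV, i⟩ := st
  have h1 := pyOrd_eq_iff c 42 '*' "*" rfl rfl h
  have h2 := pyOrd_eq_iff c 62 '>' ">" rfl rfl h
  have h3 := pyOrd_eq_iff c 118 'v' "v" rfl rfl h
  simp only [rowStatsStepB, rowStatsStepStr]
  by_cases ha : pyOrd c = 42
  · rw [if_pos ha, if_pos (h1.mp ha)]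
  · rw [if_neg ha, if_neg (fun hh => ha (h1.mpr hh))]
    by_cases hb : pyOrd c = 62
    · rw [if_pos hb, if_pos (h2.mp hb)]
    · rw [if_neg hb, if_neg (fun hh => hb (h2.mpr hh))]
      by_cases hc : pyOrd c = 118
      · rw [if_pos hc, if_pos (h3.mp hc)]
      · rw [if_neg hc, if_neg (fun hh => hc (h3.mpr hh))]

theorem rowStatsAux (row : List String) : ∀ (stars rights downs firstV i : Int), 0 ≤ i →
    row.foldl rowStatsStepStr (stars, rights, downs, firstV, i)
      = (stars + row.count "*", rights + row.count ">", downs + row.count "v",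
         (if firstV < 0 then
            (match PySem.List.index? row "v" with
             | some k => i + (k : Int)
             | none => firstV)
          else firstV),
         i + row.length) := by
  induction row with
  | nil =>
    intro stars rights downs firstV i hi
    simp [PySem.List.index?]
  | cons c row ih =>
    intro stars rights downs firstV i hi
    rw [List.foldl_cons]
    rw [show rowStatsStepStr (stars, rights, downs, firstV, i) c
          = (if c = "*" then (stars + 1, rights, downs, firstV, i + 1)
             else if c = ">" then (stars, rights + 1, downs, firstV, i + 1)
             else if c = "v" then (stars, rights, downs + 1, (if firstV < 0 then i else firstV), i + 1)
             else (stars, rights, downs, firstV, i + 1)) from rfl]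
    by_cases h1 : c = "*"
    · rw [if_pos h1, ih _ _ _ _ _ (by omega), h1]
      rw [PySem.List.index?_cons_of_ne _ (by decide : ("*" : String) ≠ "v")]
      cases hidx : PySem.List.index? row "v" with
      | none =>
        simp [hidx, Prod.mk.injEq, List.count_cons]
        all_goals try split_ifs
        all_goals try push_cast [Int.ofNat_eq_natCast]
        all_goals try (refine ⟨?_, ?_⟩ <;> try refine ⟨?_, ?_⟩ <;> try refine ⟨?_, ?_⟩ <;> try refine ⟨?_, ?_⟩)
        all_goals first | omega | ring | trivial | assumption
      | some k =>
        simp [hidx, Prod.mk.injEq, List.count_cons]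
        all_goals try split_ifs
        all_goals try push_cast [Int.ofNat_eq_natCast]
        all_goals try (refine ⟨?_, ?_⟩ <;> try refine ⟨?_, ?_⟩ <;> try refine ⟨?_, ?_⟩ <;> try refine ⟨?_, ?_⟩)
        all_goals first | omega | ring | trivial | assumption
    · rw [if_neg h1]
      by_cases h2 : c = ">"
      · rw [if_pos h2, ih _ _ _ _ _ (by omega), h2]
        rw [PySem.List.index?_cons_of_ne _ (by decide : (">" : String) ≠ "v")]
        cases hidx : PySem.List.index? row "v" with
        | none =>
          simp [hidx, Prod.mk.injEq, List.count_cons]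
          all_goals try split_ifs
          all_goals try push_cast [Int.ofNat_eq_natCast]
          all_goals try (refine ⟨?_, ?_⟩ <;> try refine ⟨?_, ?_⟩ <;> try refine ⟨?_, ?_⟩ <;> try refine ⟨?_, ?_⟩)
          all_goals first | omega | ring | trivial | assumption
        | some k =>
          simp [hidx, Prod.mk.injEq, List.count_cons]
          all_goals try split_ifs
          all_goals try push_cast [Int.ofNat_eq_natCast]
          all_goals try (refine ⟨?_, ?_⟩ <;> try refine ⟨?_, ?_⟩ <;> try refine ⟨?_, ?_⟩ <;> try refine ⟨?_, ?_⟩)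
          all_goals first | omega | ring | trivial | assumption
      · rw [if_neg h2]
        by_cases h3 : c = "v"
        · rw [if_pos h3, ih _ _ _ _ _ (by omega), h3]
          rw [PySem.List.index?_cons_self]
          simp [Prod.mk.injEq, List.count_cons]
          all_goals try split_ifs
          all_goals try push_cast [Int.ofNat_eq_natCast]
          all_goals try (refine ⟨?_, ?_⟩ <;> try refine ⟨?_, ?_⟩ <;> try refine ⟨?_, ?_⟩ <;> try refine ⟨?_, ?_⟩)
          all_goals first | omega | ring | trivial | assumption
        · rw [if_neg h3, ih _ _ _ _ _ (by omega)]
          rw [PySem.List.index?_cons_of_ne _ h3]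
          cases hidx : PySem.List.index? row "v" with
          | none =>
            simp [hidx, Prod.mk.injEq, List.count_cons,
              beq_false_of_ne (fun hh => h1 hh.symm),
              beq_false_of_ne (fun hh => h2 hh.symm),
              beq_false_of_ne (fun hh => h3 hh.symm)]
            all_goals try split_ifs
            all_goals try push_cast [Int.ofNat_eq_natCast]
            all_goals try (refine ⟨?_, ?_⟩ <;> try refine ⟨?_, ?_⟩ <;> try refine ⟨?_, ?_⟩ <;> try refine ⟨?_, ?_⟩)
            all_goals first | omega | ring | trivial | assumption
          | some k =>
            simp [hidx, Prod.mk.injEq, List.count_cons,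
              beq_false_of_ne (fun hh => h1 hh.symm),
              beq_false_of_ne (fun hh => h2 hh.symm),
              beq_false_of_ne (fun hh => h3 hh.symm)]
            all_goals try split_ifs
            all_goals try push_cast [Int.ofNat_eq_natCast]
            all_goals try (refine ⟨?_, ?_⟩ <;> try refine ⟨?_, ?_⟩ <;> try refine ⟨?_, ?_⟩ <;> try refine ⟨?_, ?_⟩)
            all_goals first | omega | ring | trivial | assumption

theorem rowStatsB_spec (row : List String) (h : ∀ s ∈ row, s.toList.length = 1) :
    rowStatsB row = ((row.count "*" : Int), (row.count ">" : Int), (row.count "v" : Int),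
      (match PySem.List.index? row "v" with | some k => (k : Int) | none => -1)) := by
  unfold rowStatsB
  dsimp only
  rw [PySem.List.foldl_congr_mem row rowStatsStepB rowStatsStepStr (0, 0, 0, -1, 0)
      (fun acc x hx => rowStatsStep_agree acc x (h x hx))]
  rw [rowStatsAux row 0 0 0 (-1) 0 le_rfl]
  simp only [zero_add, if_pos (by omega : (-1 : Int) < 0)]

-- ---- right-then-down agreement, per row ----

theorem rtd_eq (row : List String) (idx : Nat)
    (hidx : PySem.List.index? row "v" = some idx) (hc : row.count "v" ≠ 0) :
    rtd3A row (row.count "v") ((row.count ">" : Int)) = rightThenDownB row (idx : Int) := by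
  obtain ⟨pre0, suf0, hdec, hplen, hpre0⟩ := (PySem.List.index?_eq_some_iff _ _ _).mp hidx
  unfold rtd3A rightThenDownB
  rw [if_neg hc, hidx]
  simp only [Option.getD_some]
  rw [show ((idx : Int) + 1).toNat = idx + 1 by omega]
  have hfrom : PySem.List.slice row (some ((idx + 1 : Nat) : Int)) none = suf0 := by
    rw [PySem.List.slice_from_natCast, hdec, ← hplen,
        show pre0.length + 1 = pre0.length + 1 from rfl, List.drop_length_add_append]
    simp
  have hto : PySem.List.slice row none (some ((idx + 1 : Nat) : Int)) = pre0 ++ ["v"] := by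
    rw [PySem.List.slice_to_natCast, hdec, ← hplen, List.take_length_add_append]
    simp
  rw [hfrom, hto]
  have hlastNR : (suf0 ++ (pre0 ++ ["v"])).getLast? = some "v" := by
    rw [show suf0 ++ (pre0 ++ ["v"]) = (suf0 ++ pre0) ++ ["v"] by simp, List.getLast?_concat]
  have hcntgt : ((row.count ">" : Int)) = (((suf0 ++ (pre0 ++ ["v"])).drop 0).count ">" : Int) := by
    rw [List.drop_zero, hdec]
    simp [List.count_append, List.count_cons]
    omega
  have hcntv : ((suf0 ++ (pre0 ++ ["v"])).drop 0).count "v" ≤ row.count "v" := by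
    rw [List.drop_zero, hdec]
    simp [List.count_append, List.count_cons]
    omega
  have hmain := rtdLoopA_eq (suf0 ++ (pre0 ++ ["v"])) (row.count "v") 0
    ((row.count ">" : Int)) 0 (Or.inr (by rw [List.drop_zero]; exact hlastNR)) hcntgt hcntv le_rfl
  rw [List.drop_zero] at hmain
  rw [hmain]
  have := scanB_nonneg (suf0 ++ (pre0 ++ ["v"])) false 0 0 le_rfl
  omega

-- ---- per-row and fold assembly ----

theorem step_eq (C : Int) (cnt : Nat → Int) (res : Int) (row : List String)
    (h : ∀ s ∈ row, s.toList.length = 1) :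
    (stepA C (cnt, res) row).2 = stepB C res row := by
  dsimp only [stepA, stepB]
  rw [getCountsA_fst row cnt h, rowStatsB_spec row h]
  simp only [Int.toNat_natCast]
  by_cases hC : ((row.count ">" : Int)) = C
  · rw [if_pos hC, if_pos hC]
  · rw [if_neg hC, if_neg hC]
    by_cases h0 : ((row.count ">" : Int)) = 0
    · rw [if_pos h0, if_pos h0]
    · rw [if_neg h0, if_neg h0]
      by_cases hv : row.count "v" = 0
      · rw [show rtd3A row (row.count "v") ((row.count ">" : Int)) = 0 by
              unfold rtd3A
              rw [if_pos hv]]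
        have hvz : ((row.count "v" : Int)) = 0 := by simp [hv]
        simp [hvz]
      · have hvz : ¬ ((row.count "v" : Int)) = 0 := by simpa using hv
        have hmem : "v" ∈ row := by
          by_contra hn
          exact hv (List.count_eq_zero.mpr hn)
        obtain ⟨idx, hidx⟩ := Option.isSome_iff_exists.mp
          ((PySem.List.index?_isSome_iff _ _).mpr hmem)
        rw [hidx, rtd_eq row idx hidx hv]
        simp [hv, hvz]

theorem fold_eq (C : Int) (rows : List (List String)) : ∀ (cnt : Nat → Int) (res : Int),
    (∀ row ∈ rows, ∀ s ∈ row, s.toList.length = 1) →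
    (rows.foldl (stepA C) (cnt, res)).2 = rows.foldl (stepB C) res := by
  induction rows with
  | nil => intro cnt res _; simp
  | cons row rows ih =>
    intro cnt res hall
    rw [List.foldl_cons, List.foldl_cons]
    have hrow := hall row (List.mem_cons_self)
    have hrest : ∀ r ∈ rows, ∀ s ∈ r, s.toList.length = 1 :=
      fun r hr => hall r (List.mem_cons_of_mem _ hr)
    have hpair : stepA C (cnt, res) row
        = ((stepA C (cnt, res) row).1, stepB C res row) := by
      rw [← step_eq C cnt res row hrow]
    rw [hpair, ih _ _ hrest]

-- ===== VERDICT (by name: the statement is the Claim_ definition above) =====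
theorem getMaxCollectableCoins_spec : Claim_equal_getMaxCollectableCoins := by
  intro R C G _ hPre
  unfold Spec_getMaxCollectableCoins getMaxCollectableCoins getMaxCollectableCoins_alt
  rw [PySem.List.slice?_none_none_neg_one]
  simp only [Option.getD_some]
  exact fold_eq C G.reverse (fun _ => 0) 0 (fun row hr => hPre row (List.mem_reverse.mp hr))
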